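-- pv_equiv track=rewrite | github.com/roman-romanov-o/sahaidachny | saha/runners/usage.py | normalize_token_usage
-- ===== SOURCE A (Python) =====
-- from typing import Any
--
-- _ALIAS_MAP: dict[str, list[str]] = {
--     "input_tokens": ["input_tokens", "prompt_tokens", "prompt", "input"],
--     "output_tokens": ["output_tokens", "completion_tokens", "completion", "output"],
--     "cache_read_input_tokens": [
--         "cache_read_input_tokens",
--         "cache_read_tokens",
--         "cached_tokens",
--         "cache_read",
--     ],
--     "cache_write_input_tokens": [
--         "cache_creation_input_tokens",
--         "cache_write_input_tokens",
--         "cache_creation",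
--         "cache_write",
--     ],
--     "reasoning_tokens": ["reasoning_tokens", "reasoning_output_tokens", "reasoning"],
--     "total_tokens": ["total_tokens", "total_token_usage", "total"],
-- }
--
-- def normalize_token_usage(raw: dict[str, Any]) -> dict[str, int] | None:
--     """Normalize raw usage payloads to a consistent schema."""
--     result: dict[str, int] = {}
--
--     for target, aliases in _ALIAS_MAP.items():
--         for alias in aliases:
--             value = raw.get(alias)
--             if isinstance(value, bool):
--                 continue
--             if isinstance(value, (int, float)):
--                 result[target] = int(value)
--                 break
--
--     if not result:
--         return None
--
--     if "total_tokens" not in result: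
--         input_tokens = result.get("input_tokens", 0)
--         output_tokens = result.get("output_tokens", 0)
--         if input_tokens or output_tokens:
--             result["total_tokens"] = input_tokens + output_tokens
--
--     return result
-- ===== SOURCE B (Python) =====
-- _ALIAS_MAP: dict[str, list[str]] = {
--     "input_tokens": ["input_tokens", "prompt_tokens", "prompt", "input"],
--     "output_tokens": ["output_tokens", "completion_tokens", "completion", "output"],
--     "cache_read_input_tokens": [
--         "cache_read_input_tokens",
--         "cache_read_tokens",
--         "cached_tokens",
--         "cache_read",
--     ],
--     "cache_write_input_tokens": [
--         "cache_creation_input_tokens",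
--         "cache_write_input_tokens",
--         "cache_creation",
--         "cache_write",
--     ],
--     "reasoning_tokens": ["reasoning_tokens", "reasoning_output_tokens", "reasoning"],
--     "total_tokens": ["total_tokens", "total_token_usage", "total"],
-- }
--
--
-- def normalize_token_usage(raw):
--     """Normalize raw usage payloads to a consistent schema (single scan of raw per target)."""
--     result: dict[str, int] = {}
--
--     for target, aliases in _ALIAS_MAP.items():
--         best = None  # (alias index, value) with minimal alias index seen so far
--         for key, value in raw.items():
--             if key not in aliases:
--                 continue
--             if isinstance(value, bool):
--                 continue
--             if not isinstance(value, (int, float)):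
--                 continue
--             i = aliases.index(key)
--             if best is None or i < best[0]:
--                 best = (i, int(value))
--         if best is not None:
--             result[target] = best[1]
--
--     if not result:
--         return None
--
--     if "total_tokens" not in result:
--         input_tokens = result.get("input_tokens", 0)
--         output_tokens = result.get("output_tokens", 0)
--         if input_tokens or output_tokens:
--             result["total_tokens"] = input_tokens + output_tokens
--
--     return result
-- ===== Notes on version B (the rewrite author's own statement) =====
-- stated objective: alternative
-- what changed: A probes the dict once per alias (first present alias wins, with break); B instead makes a single scan over the raw items per target, keeping the entry whose alias index is minimal, so the dict is traversed as data instead of being probed per alias.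
import Mathlib
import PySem

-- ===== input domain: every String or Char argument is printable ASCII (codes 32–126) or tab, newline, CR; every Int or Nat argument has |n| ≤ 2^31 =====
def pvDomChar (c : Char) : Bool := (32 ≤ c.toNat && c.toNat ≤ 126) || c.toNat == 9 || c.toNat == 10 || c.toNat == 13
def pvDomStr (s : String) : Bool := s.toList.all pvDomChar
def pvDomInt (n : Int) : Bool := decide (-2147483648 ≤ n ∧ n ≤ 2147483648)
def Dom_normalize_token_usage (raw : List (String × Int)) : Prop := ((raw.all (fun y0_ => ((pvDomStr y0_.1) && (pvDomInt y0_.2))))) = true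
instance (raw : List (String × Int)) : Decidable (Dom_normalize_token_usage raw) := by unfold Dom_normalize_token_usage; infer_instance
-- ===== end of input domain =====

-- B replaces A's per-alias dict probes by one scan of the raw items per target keeping the
-- minimal-alias-index entry; same return value everywhere (return value only; neither mutates).

-- the module constant _ALIAS_MAP (shared data, used by both Pythons)
def pvAliasMap : List (String × List String) :=
  [("input_tokens", ["input_tokens", "prompt_tokens", "prompt", "input"]),
   ("output_tokens", ["output_tokens", "completion_tokens", "completion", "output"]),
   ("cache_read_input_tokens",
      ["cache_read_input_tokens", "cache_read_tokens", "cached_tokens", "cache_read"]),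
   ("cache_write_input_tokens",
      ["cache_creation_input_tokens", "cache_write_input_tokens", "cache_creation", "cache_write"]),
   ("reasoning_tokens", ["reasoning_tokens", "reasoning_output_tokens", "reasoning"]),
   ("total_tokens", ["total_tokens", "total_token_usage", "total"])]

-- ===== PORT A =====
-- A's inner 'for alias in aliases: value = raw.get(alias) … break'.  Values are Int by the type
-- convention, so 'isinstance(value, bool)' is never true and 'isinstance(value, (int, float))'
-- (with int(value) the identity) always holds: the loop takes the first alias present in raw.
def pvFirstAlias (rawD : PySem.Dict String Int) : List String → Option Int
  | [] => none
  | a :: rest =>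
    match rawD.get? a with
    | some v => some v
    | none => pvFirstAlias rawD rest

-- shared tail of both Pythons: 'if not result: return None' and the total_tokens fallback
def pvFinish (result : PySem.Dict String Int) : Option (List (String × Int)) :=
  if result.size = 0 then none
  else
    let result2 :=
      if result.contains "total_tokens" then result
      else
        let input_tokens := result.getD "input_tokens" 0
        let output_tokens := result.getD "output_tokens" 0
        if input_tokens ≠ 0 ∨ output_tokens ≠ 0 then
          result.insert "total_tokens" (input_tokens + output_tokens)
        else result
    some result2.items

def normalize_token_usage (raw : List (String × Int)) : Option (List (String × Int)) :=
  let rawD := PySem.Dict.mk raw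
  let result : PySem.Dict String Int :=
    pvAliasMap.foldl (fun res p =>
      match pvFirstAlias rawD p.2 with
      | some v => res.insert p.1 v
      | none => res) PySem.Dict.empty
  pvFinish result

-- ===== PORT B =====
-- B's inner 'for key, value in raw.items()' scan keeping the entry with minimal alias index
-- (values are Int, so the bool/float isinstance guards of Source B are vacuous / always-true as in A).
def pvBestScan (aliases : List String) (raw : List (String × Int)) : Option (Nat × Int) :=
  raw.foldl (fun best kv =>
    if aliases.contains kv.1 then
      match PySem.List.index? aliases kv.1 with
      | some i =>
        match best with
        | none => some (i, kv.2)
        | some jw => if i < jw.1 then some (i, kv.2) else best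
      | none => best
    else best) none

def normalize_token_usage_alt (raw : List (String × Int)) : Option (List (String × Int)) :=
  let result : PySem.Dict String Int :=
    pvAliasMap.foldl (fun res p =>
      match pvBestScan p.2 raw with
      | some iv => res.insert p.1 iv.2
      | none => res) PySem.Dict.empty
  pvFinish result

-- ===== PRECONDITION & SPEC =====
def Spec_normalize_token_usage (raw : List (String × Int)) (out : Option (List (String × Int))) : Prop := out = normalize_token_usage_alt raw
instance (raw : List (String × Int)) (out : Option (List (String × Int))) : Decidable (Spec_normalize_token_usage raw out) := by unfold Spec_normalize_token_usage; infer_instance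

-- ===== CLAIM (what is proved, stated in full; the proofs are below) =====
def Claim_equal_normalize_token_usage : Prop := ∀ (raw : List (String × Int)), Dom_normalize_token_usage raw → Spec_normalize_token_usage raw (normalize_token_usage raw)

-- ===== LEMMAS AND PROOFS =====

-- shift the alias index of an optional candidate by one
def pvShift (o : Option (Nat × Int)) : Option (Nat × Int) := o.map (fun p => (p.1 + 1, p.2))

-- once the index-0 candidate is installed it is never replaced
lemma pvBestScan_zero_absorb (as : List String) (v : Int) (raw : List (String × Int)) :
    raw.foldl (fun best kv =>
      if as.contains kv.1 then
        match PySem.List.index? as kv.1 with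
        | some i =>
          match best with
          | none => some (i, kv.2)
          | some jw => if i < jw.1 then some (i, kv.2) else best
        | none => best
      else best) (some (0, v)) = some (0, v) := by
  induction raw with
  | nil => rfl
  | cons kv raw ih =>
    simp only [List.foldl_cons]
    split
    · split
      · simpa using ih
      · exact ih
    · exact ih

-- one cons step on the alias list: either the head alias is present in raw and index 0 wins,
-- or everything mirrors the scan over the tail aliases with indices shifted by one
lemma pvBestScan_cons (a : String) (rest : List String) (raw : List (String × Int))
    (b : Option (Nat × Int)) :
    raw.foldl (fun best kv =>
      if (a :: rest).contains kv.1 then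
        match PySem.List.index? (a :: rest) kv.1 with
        | some i =>
          match best with
          | none => some (i, kv.2)
          | some jw => if i < jw.1 then some (i, kv.2) else best
        | none => best
      else best) (pvShift b) =
    match (PySem.Dict.mk raw).get? a with
    | some v => some (0, v)
    | none =>
      pvShift (raw.foldl (fun best kv =>
        if rest.contains kv.1 then
          match PySem.List.index? rest kv.1 with
          | some i =>
            match best with
            | none => some (i, kv.2)
            | some jw => if i < jw.1 then some (i, kv.2) else best
          | none => best
        else best) b) := by
  induction raw generalizing b with
  | nil => simp [PySem.Dict.get?]
  | cons kv raw ih =>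
    obtain ⟨k, v⟩ := kv
    by_cases hk : k = a
    · subst hk
      have hget : (PySem.Dict.mk ((k, v) :: raw)).get? k = some v := by
        simp [PySem.Dict.get?_mk_cons]
      rw [hget]
      simp only [List.foldl_cons]
      have hstep : (if (k :: rest).contains k then
          match PySem.List.index? (k :: rest) k with
          | some i =>
            match pvShift b with
            | none => some (i, v)
            | some jw => if i < jw.1 then some (i, v) else pvShift b
          | none => pvShift b
        else pvShift b) = some (0, v) := by
        rw [PySem.List.index?_cons_self]
        cases b with
        | none => simp [pvShift]
        | some jw => simp [pvShift]
      rw [hstep]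
      exact pvBestScan_zero_absorb (k :: rest) v raw
    · have hget : (PySem.Dict.mk ((k, v) :: raw)).get? a = (PySem.Dict.mk raw).get? a := by
        rw [PySem.Dict.get?_mk_cons]
        simp [show (k == a) = false by simp [hk]]
      rw [hget]
      simp only [List.foldl_cons]
      have hne : a ≠ k := fun h => hk h.symm
      have hidx : PySem.List.index? (a :: rest) k = (PySem.List.index? rest k).map (· + 1) :=
        PySem.List.index?_cons_of_ne _ hne
      have hcont : (a :: rest).contains k = rest.contains k := by
        simp only [List.contains_cons]
        simp [show (k == a) = false by simp [hk]]
      by_cases hmem : rest.contains k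
      · rcases hi : PySem.List.index? rest k with _ | i
        · exfalso
          have : k ∈ rest := by simpa using hmem
          have := (PySem.List.index?_isSome_iff rest k).mpr this
          rw [hi] at this; simp at this
        · have hstepL : (if (a :: rest).contains k then
              match PySem.List.index? (a :: rest) k with
              | some i' =>
                match pvShift b with
                | none => some (i', v)
                | some jw => if i' < jw.1 then some (i', v) else pvShift b
              | none => pvShift b
            else pvShift b) =
            pvShift (if rest.contains k then
              match PySem.List.index? rest k with
              | some i' =>
                match b with
                | none => some (i', v)
                | some jw => if i' < jw.1 then some (i', v) else b
              | none => b
            else b) := by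
            rw [hcont, hidx, hi]
            simp only [hmem, if_true, Option.map_some]
            cases b with
            | none => simp [pvShift]
            | some jw =>
              simp only [pvShift, Option.map_some]
              by_cases hlt : i < jw.1
              · simp [hlt]
              · simp [hlt]
          rw [hstepL, ih, hi]
      · have hc2 : ((a :: rest).contains k) = false := by
          rw [hcont]; simpa using hmem
        have hc3 : (rest.contains k) = false := by simpa using hmem
        rw [if_neg (show ¬((a :: rest).contains k = true) by rw [hc2]; simp), ih,
          if_neg (show ¬(rest.contains k = true) by rw [hc3]; simp)]

-- the per-target equivalence: B's minimal-index scan returns exactly the value of A's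
-- first-present-alias probe
lemma pvBestScan_eq_firstAlias (as : List String) (raw : List (String × Int)) :
    (pvBestScan as raw).map (·.2) = pvFirstAlias (PySem.Dict.mk raw) as := by
  induction as with
  | nil =>
    have : pvBestScan [] raw = none := by
      unfold pvBestScan; simp
    simp [this, pvFirstAlias]
  | cons a rest ih =>
    have h := pvBestScan_cons a rest raw none
    have hb : pvShift (none : Option (Nat × Int)) = none := rfl
    rw [hb] at h
    unfold pvBestScan at *
    rw [h]
    unfold pvFirstAlias
    cases hg : (PySem.Dict.mk raw).get? a with
    | some v => simp
    | none =>
      simp only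
      rw [← ih]
      cases raw.foldl _ (none : Option (Nat × Int)) <;> simp [pvShift]

-- the two result dicts coincide
lemma pvResult_eq (raw : List (String × Int)) :
    pvAliasMap.foldl (fun res p =>
      match pvFirstAlias (PySem.Dict.mk raw) p.2 with
      | some v => res.insert p.1 v
      | none => res) PySem.Dict.empty =
    pvAliasMap.foldl (fun res p =>
      match pvBestScan p.2 raw with
      | some iv => res.insert p.1 iv.2
      | none => res) PySem.Dict.empty := by
  have hstep : ∀ (res : PySem.Dict String Int) (p : String × List String),
      (match pvFirstAlias (PySem.Dict.mk raw) p.2 with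
       | some v => res.insert p.1 v
       | none => res) =
      (match pvBestScan p.2 raw with
       | some iv => res.insert p.1 iv.2
       | none => res) := by
    intro res p
    have h := pvBestScan_eq_firstAlias p.2 raw
    cases hb : pvBestScan p.2 raw with
    | none => rw [hb] at h; simp at h; rw [← h]
    | some iv => rw [hb] at h; simp at h; rw [← h]
  have hfun : (fun (res : PySem.Dict String Int) (p : String × List String) =>
      match pvFirstAlias (PySem.Dict.mk raw) p.2 with
      | some v => res.insert p.1 v
      | none => res) =
      (fun res p =>
      match pvBestScan p.2 raw with
      | some iv => res.insert p.1 iv.2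
      | none => res) := funext fun res => funext fun p => hstep res p
  rw [hfun]

-- ===== VERDICT (by name: the statement is the Claim_ definition above) =====
theorem normalize_token_usage_spec : Claim_equal_normalize_token_usage := by
  intro raw _
  unfold Spec_normalize_token_usage
  exact congrArg pvFinish (pvResult_eq raw)
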